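-- pv_equiv track=rewrite | github.com/thechosenone-shall-prevail/PRISM | engine.py | _expand_techniques
-- ===== SOURCE A (Python) =====
-- def _expand_techniques(observed: set, group_techs: set) -> set:
--     """Expand observed techniques to also match parent/sub-technique variants."""
--     expanded = set(observed)
--     for obs in observed:
--         if "." in obs:
--             expanded.add(obs.split(".")[0])
--         for gt in group_techs:
--             if "." in gt and gt.startswith(obs + "."):
--                 expanded.add(gt)
--     return expanded
-- ===== SOURCE B (Python) =====
-- def _expand_techniques(observed: set, group_techs: set) -> set:
--     """Expand observed techniques to also match parent/sub-technique variants."""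
--     # Index each dotted group technique by every prefix ending just before a dot,
--     # so matching candidates for an observed id are found by one dict lookup.
--     pref2gts = {}
--     for gt in group_techs:
--         for i, c in enumerate(gt):
--             if c == ".":
--                 pref2gts.setdefault(gt[:i], []).append(gt)
--     expanded = set(observed)
--     for obs in observed:
--         if "." in obs:
--             expanded.add(obs.split(".")[0])
--         expanded.update(pref2gts.get(obs, []))
--     return expanded
-- ===== Notes on version B (the rewrite author's own statement) =====
-- stated objective: faster
-- what changed: B replaces A's inner scan of all group techniques for every observed id by a dict built once that indexes each dotted group technique under every prefix ending before a dot, so matches come from one lookup per observed id.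
import Mathlib
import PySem

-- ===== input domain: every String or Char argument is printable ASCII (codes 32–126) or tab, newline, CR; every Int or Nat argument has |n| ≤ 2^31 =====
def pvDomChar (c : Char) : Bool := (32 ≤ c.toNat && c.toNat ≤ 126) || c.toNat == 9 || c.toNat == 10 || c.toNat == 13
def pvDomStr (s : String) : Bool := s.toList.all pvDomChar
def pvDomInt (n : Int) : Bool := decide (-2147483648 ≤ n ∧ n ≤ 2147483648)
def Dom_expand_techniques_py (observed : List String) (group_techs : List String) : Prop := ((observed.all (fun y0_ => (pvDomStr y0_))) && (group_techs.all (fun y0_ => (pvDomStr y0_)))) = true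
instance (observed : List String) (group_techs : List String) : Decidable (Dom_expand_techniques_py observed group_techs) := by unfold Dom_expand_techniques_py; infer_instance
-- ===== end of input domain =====

-- B replaces A's inner scan of group_techs per observed id by a dict indexing each dotted
-- group technique under every prefix ending before a dot (asymptotically fewer comparisons).

-- ===== PORT A =====
def expand_techniques_py (observed : List String) (group_techs : List String) : List String :=
  observed.foldl
    (fun expanded obs =>
      let expanded :=
        if PySem.Str.isIn "." obs then
          PySem.Set.add expanded (PySem.List.pyGetD ((PySem.Str.split? obs ".").getD []) 0 "")
        else expanded
      group_techs.foldl
        (fun e gt =>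
          if PySem.Str.isIn "." gt && PySem.Str.startswith gt (obs ++ ".") then
            PySem.Set.add e gt
          else e)
        expanded)
    (PySem.Set.ofList observed)

-- ===== PORT B =====
-- inner loop body of Source B's index builder: 'if c == ".": pref2gts.setdefault(gt[:i], []).append(gt)'
def pvIndexStep (gt : String) (d : PySem.Dict String (List String)) (p : Int × Char) :
    PySem.Dict String (List String) :=
  if p.2 == '.' then
    let pref := PySem.Str.slice gt none (some p.1)
    PySem.Dict.insert d pref (PySem.Dict.getD d pref [] ++ [gt])
  else d

-- Source B: pref2gts built over group_techs, 'for i, c in enumerate(gt)'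
def pvIndex (group_techs : List String) : PySem.Dict String (List String) :=
  group_techs.foldl
    (fun d gt => (PySem.List.enumerate gt.toList 0).foldl (pvIndexStep gt) d)
    PySem.Dict.empty

def expand_techniques_py_alt (observed : List String) (group_techs : List String) : List String :=
  let pref2gts := pvIndex group_techs
  observed.foldl
    (fun expanded obs =>
      let expanded :=
        if PySem.Str.isIn "." obs then
          PySem.Set.add expanded (PySem.List.pyGetD ((PySem.Str.split? obs ".").getD []) 0 "")
        else expanded
      PySem.Set.update expanded (PySem.Dict.getD pref2gts obs []))
    (PySem.Set.ofList observed)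

-- ===== PRECONDITION & SPEC =====
def Spec_expand_techniques_py (observed : List String) (group_techs : List String) (out : List String) : Prop := out = expand_techniques_py_alt observed group_techs
instance (observed : List String) (group_techs : List String) (out : List String) : Decidable (Spec_expand_techniques_py observed group_techs out) := by unfold Spec_expand_techniques_py; infer_instance

-- ===== CLAIM (what is proved, stated in full; the proofs are below) =====
def Claim_equal_expand_techniques_py : Prop := ∀ (observed : List String) (group_techs : List String), Dom_expand_techniques_py observed group_techs → Spec_expand_techniques_py observed group_techs (expand_techniques_py observed group_techs)

-- ===== LEMMAS AND PROOFS =====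

-- if gt starts with obs + "." then "." occurs in gt
lemma pv_st_imp_isIn (gt obs : String) (h : PySem.Str.startswith gt (obs ++ ".") = true) :
    PySem.Str.isIn "." gt = true := by
  have h' : (obs.toList ++ ['.']) <+: gt.toList := by
    have := (PySem.Chars.startswith_iff gt.toList (obs ++ ".").toList).mp (by simpa using h)
    simpa using this
  have : ['.'] <:+: gt.toList :=
    ((List.suffix_append obs.toList ['.']).isInfix).trans h'.isInfix
  rw [show PySem.Str.isIn "." gt = PySem.Chars.isIn ".".toList gt.toList from by simp]
  exact (PySem.Chars.isIn_iff_infix _ _).mpr (by simpa using this)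

-- the string comparison 'gt[:i] == obs' for a natural index, on the character-list side
lemma pv_slice_beq (gt obs : String) (s : Nat) :
    (PySem.Str.slice gt none (some (s : Int)) == obs) = decide (gt.toList.take s = obs.toList) := by
  have hl : (PySem.Str.slice gt none (some (s : Int))).toList = gt.toList.take s := by
    rw [PySem.Str.toList_slice, PySem.Chars.slice_eq_listSlice, PySem.List.slice_to_natCast]
  by_cases h : gt.toList.take s = obs.toList
  · have he : PySem.Str.slice gt none (some (s : Int)) = obs :=
      String.toList_inj.mp (by rw [hl, h])
    simp [he, h]
  · have : PySem.Str.slice gt none (some (s : Int)) ≠ obs := by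
      intro he; exact h (by rw [← hl, he])
    simp [h, beq_eq_false_iff_ne.mpr this]

-- the effect of the inner index-building fold on one key: gt is appended once per matching pair
lemma pv_getD_innerFold (gt obs : String) :
    ∀ (ps : List (Int × Char)) (d : PySem.Dict String (List String)),
      PySem.Dict.getD (ps.foldl (pvIndexStep gt) d) obs []
        = PySem.Dict.getD d obs []
            ++ List.replicate
                (ps.countP (fun p => p.2 == '.' && (PySem.Str.slice gt none (some p.1) == obs))) gt := by
  intro ps
  induction ps with
  | nil => intro d; simp
  | cons p ps ih =>
    intro d
    by_cases hq : p.2 = '.'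
    · by_cases hk : PySem.Str.slice gt none (some p.1) = obs
      · simp [List.foldl_cons, pvIndexStep, hq, ih, hk, PySem.Dict.getD_insert_self,
          List.replicate_succ, List.append_assoc]
      · have hne : obs ≠ PySem.Str.slice gt none (some p.1) := fun he => hk he.symm
        simp [List.foldl_cons, pvIndexStep, hq, ih,
          PySem.Dict.getD_insert_of_ne _ _ _ hne, hk]
    · simp [List.foldl_cons, pvIndexStep, hq, ih]

-- the number of dot positions i in gt (from position s on) with gt[:i] = obs: one iff obs + "." prefixes gt
lemma pv_count_dots (gt obs : String) :
    ∀ (s : Nat), s ≤ gt.toList.length →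
      ((PySem.List.enumerate (gt.toList.drop s) (s : Int)).countP
          (fun p => p.2 == '.' && (PySem.Str.slice gt none (some p.1) == obs)))
        = if s ≤ obs.toList.length ∧ obs.toList ++ ['.'] <+: gt.toList then 1 else 0 := by
  suffices main : ∀ (n s : Nat), s ≤ gt.toList.length → gt.toList.length - s = n →
      ((PySem.List.enumerate (gt.toList.drop s) (s : Int)).countP
          (fun p => p.2 == '.' && (PySem.Str.slice gt none (some p.1) == obs)))
        = if s ≤ obs.toList.length ∧ obs.toList ++ ['.'] <+: gt.toList then 1 else 0 by
    intro s hs; exact main _ s hs rfl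
  intro n
  induction n with
  | zero =>
    intro s hs hn
    rw [List.drop_eq_nil_of_le (by omega), PySem.List.enumerate_nil, List.countP_nil]
    rw [if_neg]
    rintro ⟨h1, h2⟩
    have := h2.length_le
    simp only [List.length_append, List.length_cons, List.length_nil] at this
    omega
  | succ n ih =>
    intro s hs hn
    have hlt : s < gt.toList.length := by omega
    rw [List.drop_eq_getElem_cons hlt, PySem.List.enumerate_cons, List.countP_cons]
    rw [show (s : Int) + 1 = ((s + 1 : Nat) : Int) from by push_cast; ring]
    rw [ih (s + 1) (by omega) (by omega)]
    simp only [pv_slice_beq]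
    by_cases htake : gt.toList.take s = obs.toList
    · have hslen : s = obs.toList.length := by
        have := congrArg List.length htake
        simp only [List.length_take] at this
        omega
      by_cases hdot : gt.toList[s] = '.'
      · have hpre : obs.toList ++ ['.'] <+: gt.toList := by
          rw [List.prefix_iff_eq_take]
          have hlen1 : (obs.toList ++ ['.']).length = s + 1 := by simp [hslen]
          rw [hlen1, List.take_add_one, htake, List.getElem?_eq_getElem hlt, hdot]
          rfl
        have ht : ¬ (s + 1 ≤ obs.toList.length ∧ obs.toList ++ ['.'] <+: gt.toList) :=
          fun hc => absurd hc.1 (by omega)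
        rw [if_neg ht, if_pos (show ((gt.toList[s] == '.') && decide (gt.toList.take s = obs.toList)) = true by simp [hdot, htake]), if_pos ⟨by omega, hpre⟩]
      · have hnpre : ¬ obs.toList ++ ['.'] <+: gt.toList := by
          intro hp
          apply hdot
          have hg : (obs.toList ++ ['.'])[obs.toList.length]'(by simp) = '.' := by simp
          have h3 := List.IsPrefix.getElem hp (i := obs.toList.length) (by simp)
          rw [hg] at h3
          have : gt.toList[obs.toList.length]'(by omega) = '.' := h3.symm
          simpa [hslen] using this
        have ht : ¬ (s + 1 ≤ obs.toList.length ∧ obs.toList ++ ['.'] <+: gt.toList) :=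
          fun hc => absurd hc.1 (by omega)
        rw [if_neg ht, if_neg (show ¬ ((gt.toList[s] == '.') && decide (gt.toList.take s = obs.toList)) = true by simp [hdot]), if_neg (fun hc => hnpre hc.2)]
    · by_cases hcond : s ≤ obs.toList.length ∧ obs.toList ++ ['.'] <+: gt.toList
      · have hne : s ≠ obs.toList.length := by
          intro he
          apply htake
          have hp : obs.toList <+: gt.toList := (List.prefix_append obs.toList ['.']).trans hcond.2
          have := List.prefix_iff_eq_take.mp hp
          rw [he]
          exact this.symm
        rw [if_pos ⟨by omega, hcond.2⟩, if_neg (show ¬ ((gt.toList[s] == '.') && decide (gt.toList.take s = obs.toList)) = true by simp [htake]), if_pos hcond]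
      · rw [if_neg (fun hc => hcond ⟨by omega, hc.2⟩), if_neg (show ¬ ((gt.toList[s] == '.') && decide (gt.toList.take s = obs.toList)) = true by simp [htake]), if_neg hcond]

-- one group technique's pass over the index: appended to key obs iff it starts with obs + "."
lemma pv_getD_outerStep (gt obs : String) (d : PySem.Dict String (List String)) :
    PySem.Dict.getD ((PySem.List.enumerate gt.toList 0).foldl (pvIndexStep gt) d) obs []
      = PySem.Dict.getD d obs []
          ++ (if PySem.Str.startswith gt (obs ++ ".") then [gt] else []) := by
  rw [pv_getD_innerFold]
  congr 1
  have := pv_count_dots gt obs 0 (Nat.zero_le _)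
  rw [show ((0:Nat):Int) = (0:Int) from rfl, List.drop_zero] at this
  rw [this]
  have hiff : PySem.Str.startswith gt (obs ++ ".") = true ↔ (obs.toList ++ ['.']) <+: gt.toList := by
    rw [show PySem.Str.startswith gt (obs ++ ".") = PySem.Chars.startswith gt.toList (obs ++ ".").toList from by simp]
    rw [PySem.Chars.startswith_iff]
    simp
  by_cases hpre : (obs.toList ++ ['.']) <+: gt.toList
  · rw [if_pos ⟨Nat.zero_le _, hpre⟩, if_pos (hiff.mpr hpre)]
    rfl
  · rw [if_neg (fun hc => hpre hc.2), if_neg (fun hc => hpre (hiff.mp hc))]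
    rfl

-- the index lookup at obs is exactly the filter A's inner loop implements
lemma pv_getD_index (group_techs : List String) (obs : String) :
    PySem.Dict.getD (pvIndex group_techs) obs []
      = group_techs.filter (fun gt => PySem.Str.startswith gt (obs ++ ".")) := by
  suffices h : ∀ (gts : List String) (d : PySem.Dict String (List String)),
      PySem.Dict.getD
          (gts.foldl (fun d gt => (PySem.List.enumerate gt.toList 0).foldl (pvIndexStep gt) d) d)
          obs []
        = PySem.Dict.getD d obs []
            ++ gts.filter (fun gt => PySem.Str.startswith gt (obs ++ ".")) by
    have := h group_techs PySem.Dict.empty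
    simpa [pvIndex] using this
  intro gts
  induction gts with
  | nil => intro d; simp
  | cons gt gts ih =>
    intro d
    rw [List.foldl_cons, ih, pv_getD_outerStep, List.filter_cons, List.append_assoc]
    by_cases hs : PySem.Str.startswith gt (obs ++ ".") = true
    · rw [if_pos hs, if_pos hs]
      rfl
    · rw [if_neg hs, if_neg hs]
      rfl

-- ===== VERDICT (by name: the statement is the Claim_ definition above) =====
theorem expand_techniques_py_spec : Claim_equal_expand_techniques_py := by
  intro observed group_techs _
  unfold Spec_expand_techniques_py
  unfold expand_techniques_py expand_techniques_py_alt
  congr 1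
  funext expanded obs
  rw [pv_getD_index]
  show List.foldl
      (fun e gt =>
        if (PySem.Str.isIn "." gt && PySem.Str.startswith gt (obs ++ ".")) = true then
          PySem.Set.add e gt
        else e)
      (if PySem.Str.isIn "." obs = true then
        PySem.Set.add expanded (PySem.List.pyGetD ((PySem.Str.split? obs ".").getD []) 0 "")
      else expanded) group_techs
    = List.foldl (fun e gt => PySem.Set.add e gt)
      (if PySem.Str.isIn "." obs = true then
        PySem.Set.add expanded (PySem.List.pyGetD ((PySem.Str.split? obs ".").getD []) 0 "")
      else expanded)
      (List.filter (fun gt => PySem.Str.startswith gt (obs ++ ".")) group_techs)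
  rw [List.foldl_filter]
  congr 1
  funext e gt
  by_cases hst : PySem.Str.startswith gt (obs ++ ".") = true
  · have h1 : PySem.Chars.startswith gt.toList (obs.toList ++ ['.']) = true := by simpa using hst
    have h2 : PySem.Chars.isIn ['.'] gt.toList = true := by
      simpa using pv_st_imp_isIn gt obs hst
    simp [h1, h2]
  · have h1 : ¬ PySem.Chars.startswith gt.toList (obs.toList ++ ['.']) = true := by
      intro hc
      exact hst (by simpa using hc)
    simp [h1]
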